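-- pv_equiv track=rewrite | github.com/atbrt/Hackathon-Kiro | Résolution/cost.py | rolling_window_cost
-- ===== SOURCE A (Python) =====
-- def rolling_window_cost(sigma0, sigma1, V_r, cost, w_r, M_r):
--     n = len(sigma0)
--     S = 0
--
--     for v in range(1, n-w_r+2):
--         S2 = -M_r
--         for a in range(v, v+w_r-1):
--             if sigma0[a] in V_r:
--                 S2 += 1
--         S+= (max(0, S2)**2)*cost
--     return S
-- ===== SOURCE B (Python) =====
-- def rolling_window_cost(sigma0, sigma1, V_r, cost, w_r, M_r):
--     n = len(sigma0)
--     vs = set(V_r)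
--     P = [0]
--     acc = 0
--     for x in sigma0:
--         if x in vs:
--             acc += 1
--         P.append(acc)
--     S = 0
--     for v in range(1, n - w_r + 2):
--         c = P[v + w_r - 1] - P[v] if w_r > 1 else 0
--         t = c - M_r
--         if t > 0:
--             S += t * t * cost
--     return S
-- ===== Notes on version B (the rewrite author's own statement) =====
-- stated objective: faster
-- what changed: B precomputes a membership set and a prefix-sum array of hit indicators once, so each window's count is a constant-time prefix difference instead of A's inner scan with a linear list-membership test per element.
import Mathlib
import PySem

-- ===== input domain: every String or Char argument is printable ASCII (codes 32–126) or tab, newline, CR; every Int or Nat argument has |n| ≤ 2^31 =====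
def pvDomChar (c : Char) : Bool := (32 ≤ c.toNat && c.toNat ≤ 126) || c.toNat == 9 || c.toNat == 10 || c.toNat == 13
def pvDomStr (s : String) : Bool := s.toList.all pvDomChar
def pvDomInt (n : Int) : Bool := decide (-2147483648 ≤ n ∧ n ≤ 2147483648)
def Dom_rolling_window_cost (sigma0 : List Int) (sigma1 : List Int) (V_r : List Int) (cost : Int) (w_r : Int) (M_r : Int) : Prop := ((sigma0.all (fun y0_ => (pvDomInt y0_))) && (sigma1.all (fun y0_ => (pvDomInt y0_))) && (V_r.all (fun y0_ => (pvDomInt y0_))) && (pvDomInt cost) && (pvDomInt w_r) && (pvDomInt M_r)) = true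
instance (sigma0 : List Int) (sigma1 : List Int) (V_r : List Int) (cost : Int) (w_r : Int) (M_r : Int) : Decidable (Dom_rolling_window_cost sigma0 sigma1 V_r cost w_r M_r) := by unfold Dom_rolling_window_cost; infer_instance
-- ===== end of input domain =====

-- B replaces A's per-window inner scan (with a linear `in V_r` test per element) by a
-- set for V_r plus a prefix-sum array of hit indicators, making each window O(1): faster (asymptotic).

-- ===== PORT A =====
def rolling_window_cost (sigma0 : List Int) (sigma1 : List Int) (V_r : List Int) (cost : Int) (w_r : Int) (M_r : Int) : Int :=
  -- n = len(sigma0); for v in range(1, n-w_r+2): S2 = -M_r; for a in range(v, v+w_r-1): if sigma0[a] in V_r: S2 += 1; S += (max(0,S2)**2)*cost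
  -- sigma0[a] is always in range when the inner loop runs, so Python never raises; pyGetD's default is never used.
  let n : Int := sigma0.length
  (PySem.List.pyRange 1 (n - w_r + 2) 1).foldl
    (fun S v =>
      let S2 := (PySem.List.pyRange v (v + w_r - 1) 1).foldl
        (fun S2 a => if V_r.contains (PySem.List.pyGetD sigma0 a 0) then S2 + 1 else S2) (-M_r)
      S + (max 0 S2) ^ 2 * cost) 0

-- ===== PORT B =====
def rolling_window_cost_alt (sigma0 : List Int) (sigma1 : List Int) (V_r : List Int) (cost : Int) (w_r : Int) (M_r : Int) : Int :=
  -- vs = set(V_r); P = running prefix sums of hit indicators; window count = P[v+w_r-1] - P[v]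
  let n : Int := sigma0.length
  let vs : PySem.Set Int := PySem.Set.ofList V_r
  let st := List.foldl (fun (st : List Int × Int) x =>
      (st.1 ++ [if PySem.Set.contains vs x then st.2 + 1 else st.2],
       if PySem.Set.contains vs x then st.2 + 1 else st.2)) ([0], 0) sigma0
  (PySem.List.pyRange 1 (n - w_r + 2) 1).foldl
    (fun S v =>
      let c := if 1 < w_r then PySem.List.pyGetD st.1 (v + w_r - 1) 0 - PySem.List.pyGetD st.1 v 0 else 0
      let t := c - M_r
      if 0 < t then S + t * t * cost else S) 0

-- ===== PRECONDITION & SPEC =====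
def Spec_rolling_window_cost (sigma0 : List Int) (sigma1 : List Int) (V_r : List Int) (cost : Int) (w_r : Int) (M_r : Int) (out : Int) : Prop := out = rolling_window_cost_alt sigma0 sigma1 V_r cost w_r M_r
instance (sigma0 : List Int) (sigma1 : List Int) (V_r : List Int) (cost : Int) (w_r : Int) (M_r : Int) (out : Int) : Decidable (Spec_rolling_window_cost sigma0 sigma1 V_r cost w_r M_r out) := by unfold Spec_rolling_window_cost; infer_instance

-- ===== CLAIM (what is proved, stated in full; the proofs are below) =====
def Claim_equal_rolling_window_cost : Prop := ∀ (sigma0 : List Int) (sigma1 : List Int) (V_r : List Int) (cost : Int) (w_r : Int) (M_r : Int), Dom_rolling_window_cost sigma0 sigma1 V_r cost w_r M_r → Spec_rolling_window_cost sigma0 sigma1 V_r cost w_r M_r (rolling_window_cost sigma0 sigma1 V_r cost w_r M_r)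

-- ===== LEMMAS AND PROOFS =====

-- 0/1 hit indicator and its prefix sums (proof-level descriptions of B's P array)
def pvG (V_r : List Int) : Int → Int := fun x => if V_r.contains x then 1 else 0

def pvPref (sigma0 V_r : List Int) (k : Nat) : Int := ((sigma0.map (pvG V_r)).take k).sum

lemma pvContains_ofList (V_r : List Int) (y : Int) :
    PySem.Set.contains (PySem.Set.ofList V_r) y = V_r.contains y := by
  simp [PySem.Set.mem_ofList]

-- what B's builder fold produces, for any start state
lemma pvBuild_spec (q : Int → Bool) (xs : List Int) (P0 : List Int) (a0 : Int) :
    List.foldl (fun (st : List Int × Int) x =>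
        (st.1 ++ [if q x then st.2 + 1 else st.2], if q x then st.2 + 1 else st.2)) (P0, a0) xs
    = (P0 ++ (List.range xs.length).map
          (fun i => a0 + ((xs.map (fun y => if q y then (1:Int) else 0)).take (i+1)).sum),
       a0 + (xs.map (fun y => if q y then (1:Int) else 0)).sum) := by
  induction xs generalizing P0 a0 with
  | nil => simp
  | cons x xs ih =>
    simp only [List.foldl_cons, List.map_cons, List.length_cons]
    rw [ih]
    by_cases hx : q x <;>
      simp [hx, List.range_succ_eq_map, List.map_map, Function.comp, List.take_succ_cons,
        List.append_assoc, add_assoc, add_comm]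

-- B's P array, described by pvPref
lemma pvP_eq (sigma0 V_r : List Int) :
    (List.foldl (fun (st : List Int × Int) x =>
        (st.1 ++ [if PySem.Set.contains (PySem.Set.ofList V_r) x then st.2 + 1 else st.2],
         if PySem.Set.contains (PySem.Set.ofList V_r) x then st.2 + 1 else st.2)) ([0], 0) sigma0).1
    = [0] ++ (List.range sigma0.length).map (fun i => pvPref sigma0 V_r (i+1)) := by
  rw [pvBuild_spec (fun x => PySem.Set.contains (PySem.Set.ofList V_r) x) sigma0 [0] 0]
  have hmap : sigma0.map (fun y => if PySem.Set.contains (PySem.Set.ofList V_r) y then (1:Int) else 0)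
      = sigma0.map (pvG V_r) := by
    apply List.map_congr_left
    intro a _
    rw [pvContains_ofList]
    rfl
  rw [hmap]
  simp [pvPref]

-- reading B's P array is pvPref
lemma pvP_getD (sigma0 V_r : List Int) (i : Int) (h0 : 0 ≤ i) (h1 : i ≤ (sigma0.length : Int)) :
    PySem.List.pyGetD ([0] ++ (List.range sigma0.length).map (fun j => pvPref sigma0 V_r (j+1))) i 0
      = pvPref sigma0 V_r i.toNat := by
  have hlen : (([0] ++ (List.range sigma0.length).map (fun j => pvPref sigma0 V_r (j+1))).length)
      = sigma0.length + 1 := by simp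
  rw [PySem.List.pyGetD_eq_getElem _ 0 h0 (by rw [hlen]; exact_mod_cast by omega)]
  simp only [List.singleton_append]
  rw [List.getElem_cons]
  split
  · next h => rw [h]; simp [pvPref]
  · next h =>
      have hj : i.toNat - 1 < sigma0.length := by omega
      simp only [List.getElem_map, List.getElem_range]
      congr 1
      omega

-- count of hits over an index range is a prefix difference
lemma pvCount_range (sigma0 V_r : List Int) (l m : Nat) (h : l + m ≤ sigma0.length) :
    ((PySem.List.pyRange (l : Int) ((l : Int) + (m : Int)) 1).countP
        (fun a => V_r.contains (PySem.List.pyGetD sigma0 a 0)) : Int)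
      = pvPref sigma0 V_r (l + m) - pvPref sigma0 V_r l := by
  induction m with
  | zero => simp
  | succ m ih =>
    have hb : (l : Int) ≤ (l : Int) + (m : Int) := by omega
    have hcast : (l : Int) + ((m + 1 : Nat) : Int) = ((l : Int) + (m : Int)) + 1 := by push_cast; ring
    rw [hcast, PySem.List.pyRange_one_succ_right hb, List.countP_append]
    have hlm : l + m < sigma0.length := by omega
    have hget : PySem.List.pyGetD sigma0 ((l : Int) + (m : Int)) 0 = sigma0[l + m]'hlm := by
      have hnat : ((l : Int) + (m : Int)).toNat = l + m := by omega
      rw [PySem.List.pyGetD_eq_getElem sigma0 0 (by omega) (by exact_mod_cast by omega)]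
      simp [hnat]
    have hlen : l + m < (sigma0.map (pvG V_r)).length := by simpa using hlm
    have hsum : pvPref sigma0 V_r (l + (m + 1)) = pvPref sigma0 V_r (l + m) + pvG V_r (sigma0[l + m]'hlm) := by
      have := List.sum_take_succ (sigma0.map (pvG V_r)) (l + m) hlen
      simpa [pvPref, Nat.add_assoc] using this
    rw [hsum]
    push_cast
    rw [ih (by omega)]
    by_cases hc : V_r.contains (sigma0[l + m]'hlm) <;>
      simp [List.countP_cons, hget, pvG] <;> ring

-- the per-window contribution, as both sides compute it
lemma pvStep (S d M c : Int) :
    S + (max 0 (-M + d)) ^ 2 * c = if 0 < d - M then S + (d - M) * (d - M) * c else S := by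
  by_cases h : 0 < d - M
  · rw [if_pos h]
    have h2 : max 0 (-M + d) = d - M := by rw [max_eq_right (by omega)]; ring
    rw [h2]; ring
  · rw [if_neg h, max_eq_left (by omega)]; ring

-- ===== VERDICT (by name: the statement is the Claim_ definition above) =====
theorem rolling_window_cost_spec : Claim_equal_rolling_window_cost := by
  intro sigma0 sigma1 V_r cost w_r M_r _hdom
  unfold Spec_rolling_window_cost
  simp only [rolling_window_cost, rolling_window_cost_alt]
  rw [pvP_eq]
  apply PySem.List.foldl_congr_mem
  intro S v hv
  rw [PySem.List.mem_pyRange_one] at hv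
  by_cases hw : 1 < w_r
  · obtain ⟨l, rfl⟩ : ∃ l : Nat, v = (l : Int) := ⟨v.toNat, by omega⟩
    obtain ⟨m, hm⟩ : ∃ m : Nat, w_r - 1 = (m : Int) := ⟨(w_r - 1).toNat, by omega⟩
    have hhi : (l : Int) + w_r - 1 = (l : Int) + (m : Int) := by omega
    have hle : (l : Int) + (m : Int) ≤ (sigma0.length : Int) := by omega
    rw [if_pos hw, hhi, pvP_getD sigma0 V_r _ (by omega) hle,
      pvP_getD sigma0 V_r (l : Int) (by omega) (by omega),
      PySem.List.foldl_count_if, pvCount_range sigma0 V_r l m (by omega)]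
    have h1 : ((l : Int) + (m : Int)).toNat = l + m := by omega
    have h2 : ((l : Int)).toNat = l := by omega
    rw [h1, h2]
    exact pvStep S (pvPref sigma0 V_r (l + m) - pvPref sigma0 V_r l) M_r cost
  · rw [if_neg hw, PySem.List.pyRange_one_eq_nil (by omega : v + w_r - 1 ≤ v)]
    simpa using pvStep S 0 M_r cost
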